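-- pv_equiv track=rewrite | github.com/pypi-data/pypi-mirror-396 | packages/cafga/cafga-0.0.6.tar.gz/cafga-0.0.6/src/cafga/util.py | mask_input_by_allowed_groups_string
-- ===== SOURCE A (Python) =====
-- def mask_input_by_allowed_groups_string(input_segments, group_assignments, allowed_groups, mask_value, merge_masks):
--     """Mask the input at the given index by masking all the features that are not in the allowed groups."""
--     result_string = ""
--     prev_was_masked = False
--     for i in range(len(input_segments)):
--         if group_assignments[i] in allowed_groups:
--             result_string += input_segments[
--                 i
--             ]  # Assumes necessary spaces are included in the input parts
--             prev_was_masked = False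
--         else:
--             # lg.debug(f"masking: {self.inputs[input_index][i]}")
--             if merge_masks and prev_was_masked:
--                 continue
--             result_string += mask_value
--             prev_was_masked = True
--     return result_string
-- ===== SOURCE B (Python) =====
-- def mask_input_by_allowed_groups_string(input_segments, group_assignments, allowed_groups, mask_value, merge_masks):
--     """Mask the input by run-grouping: classify each index, then handle whole runs at once."""
--     pairs = [(input_segments[i], group_assignments[i] in allowed_groups)
--              for i in range(len(input_segments))]
--     parts = []
--     rest = pairs
--     while rest:
--         flag = rest[0][1]
--         k = 1
--         while k < len(rest) and rest[k][1] == flag: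
--             k += 1
--         run, rest = rest[:k], rest[k:]
--         if flag:
--             parts.extend(s for s, _ in run)
--         elif merge_masks:
--             parts.append(mask_value)
--         else:
--             parts.extend([mask_value] * len(run))
--     return "".join(parts)
-- ===== Notes on version B (the rewrite author's own statement) =====
-- stated objective: alternative
-- what changed: A appends per index while threading a prev_was_masked flag; B classifies each index once, groups consecutive indices into runs of equal class, emits each unmasked run's segments and one mask per masked run (or one per element when not merging), and joins the parts at the end.
import Mathlib
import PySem

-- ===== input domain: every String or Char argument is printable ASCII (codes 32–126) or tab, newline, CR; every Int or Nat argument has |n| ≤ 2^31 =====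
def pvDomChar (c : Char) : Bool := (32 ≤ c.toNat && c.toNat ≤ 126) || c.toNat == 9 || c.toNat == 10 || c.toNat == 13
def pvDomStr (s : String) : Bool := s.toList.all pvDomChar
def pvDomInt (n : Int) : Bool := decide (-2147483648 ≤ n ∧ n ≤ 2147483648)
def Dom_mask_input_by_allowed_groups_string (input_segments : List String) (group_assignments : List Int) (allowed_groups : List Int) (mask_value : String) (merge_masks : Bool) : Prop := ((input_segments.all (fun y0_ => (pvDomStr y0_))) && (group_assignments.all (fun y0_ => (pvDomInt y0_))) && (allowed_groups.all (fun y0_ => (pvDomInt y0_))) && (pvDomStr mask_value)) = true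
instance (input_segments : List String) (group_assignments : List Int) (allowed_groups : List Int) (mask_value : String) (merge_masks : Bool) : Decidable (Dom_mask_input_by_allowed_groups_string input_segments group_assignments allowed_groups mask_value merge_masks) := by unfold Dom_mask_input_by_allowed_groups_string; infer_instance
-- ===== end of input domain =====

-- B replaces A's per-index loop with prev-flag state by run grouping: indices are classified once,
-- consecutive same-class runs are handled whole (one mask per masked run when merge_masks); objective: alternative decomposition.


-- ===== PORT A =====
-- literal transliteration of A's for-loop; state = (result_string, prev_was_masked);
-- group_assignments[i] is in range under Pre_, ported as getD (default never read inside Pre_)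
def mask_input_by_allowed_groups_string (input_segments : List String) (group_assignments : List Int) (allowed_groups : List Int) (mask_value : String) (merge_masks : Bool) : String :=
  (List.foldl
    (fun (st : String × Bool) (i : Nat) =>
      if group_assignments.getD i 0 ∈ allowed_groups then
        (st.1 ++ input_segments.getD i "", false)
      else if merge_masks && st.2 then st
      else (st.1 ++ mask_value, true))
    ("", false) (List.range input_segments.length)).1

-- ===== PORT B =====
-- B's outer while loop over the remaining (segment, flag) pairs: the inner while that finds the
-- end of the run of equal flags is takeWhile/dropWhile; each run contributes its parts at once
def pvMaskRuns (mask_value : String) (merge_masks : Bool) : List (String × Bool) → List String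
  | [] => []
  | (s, fl) :: rest =>
    (if fl then s :: (rest.takeWhile (fun p => p.2 == fl)).map Prod.fst
     else if merge_masks then [mask_value]
     else List.replicate ((rest.takeWhile (fun p => p.2 == fl)).length + 1) mask_value)
    ++ pvMaskRuns mask_value merge_masks (rest.dropWhile (fun p => p.2 == fl))
termination_by l => l.length
decreasing_by
  simp only [List.length_cons]
  exact Nat.lt_succ_of_le (List.length_dropWhile_le _ _)

def mask_input_by_allowed_groups_string_alt (input_segments : List String) (group_assignments : List Int) (allowed_groups : List Int) (mask_value : String) (merge_masks : Bool) : String :=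
  String.join (pvMaskRuns mask_value merge_masks
    ((List.range input_segments.length).map
      (fun i => (input_segments.getD i "", decide (group_assignments.getD i 0 ∈ allowed_groups)))))

-- ===== PRECONDITION & SPEC =====
-- Pre_ excludes exactly the inputs where Python A raises IndexError: group_assignments shorter than input_segments
def Pre_mask_input_by_allowed_groups_string (input_segments : List String) (group_assignments : List Int) (allowed_groups : List Int) (mask_value : String) (merge_masks : Bool) : Prop :=
  input_segments.length ≤ group_assignments.length
instance (input_segments : List String) (group_assignments : List Int) (allowed_groups : List Int) (mask_value : String) (merge_masks : Bool) : Decidable (Pre_mask_input_by_allowed_groups_string input_segments group_assignments allowed_groups mask_value merge_masks) := by unfold Pre_mask_input_by_allowed_groups_string; infer_instance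

def pvWitness_mask_input_by_allowed_groups_string : List String × List Int × List Int × String × Bool :=
  (["Hello ", "there ", "world"], [0, 1, 1], [0], "_", true)

def Spec_mask_input_by_allowed_groups_string (input_segments : List String) (group_assignments : List Int) (allowed_groups : List Int) (mask_value : String) (merge_masks : Bool) (out : String) : Prop := out = mask_input_by_allowed_groups_string_alt input_segments group_assignments allowed_groups mask_value merge_masks
instance (input_segments : List String) (group_assignments : List Int) (allowed_groups : List Int) (mask_value : String) (merge_masks : Bool) (out : String) : Decidable (Spec_mask_input_by_allowed_groups_string input_segments group_assignments allowed_groups mask_value merge_masks out) := by unfold Spec_mask_input_by_allowed_groups_string; infer_instance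

-- ===== CLAIM (what is proved, stated in full; the proofs are below) =====
def Claim_equal_mask_input_by_allowed_groups_string : Prop := ∀ (input_segments : List String) (group_assignments : List Int) (allowed_groups : List Int) (mask_value : String) (merge_masks : Bool), Dom_mask_input_by_allowed_groups_string input_segments group_assignments allowed_groups mask_value merge_masks → Pre_mask_input_by_allowed_groups_string input_segments group_assignments allowed_groups mask_value merge_masks → Spec_mask_input_by_allowed_groups_string input_segments group_assignments allowed_groups mask_value merge_masks (mask_input_by_allowed_groups_string input_segments group_assignments allowed_groups mask_value merge_masks)

-- ===== LEMMAS AND PROOFS =====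

-- A's loop body, viewed as a function of the current (segment, flag) pair
def pvF (mask_value : String) (merge_masks : Bool) (st : String × Bool) (p : String × Bool) : String × Bool :=
  if p.2 then (st.1 ++ p.1, false)
  else if merge_masks && st.2 then st
  else (st.1 ++ mask_value, true)

theorem pvJoinEq (l : List String) : String.join l = List.foldl (· ++ ·) "" l := rfl

theorem pvFoldlAppend : ∀ (l : List String) (s : String), List.foldl (· ++ ·) s l = s ++ String.join l := by
  intro l
  induction l with
  | nil => intro s; rw [List.foldl_nil, pvJoinEq, List.foldl_nil, String.append_empty]
  | cons a t ih =>
    intro s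
    rw [List.foldl_cons, ih (s ++ a)]
    conv_rhs => rw [pvJoinEq, List.foldl_cons, String.empty_append, ih a]
    rw [String.append_assoc]

theorem pvJoinCons (a : String) (l : List String) : String.join (a :: l) = a ++ String.join l := by
  rw [pvJoinEq, List.foldl_cons, String.empty_append, pvFoldlAppend]

theorem pvJoinAppend (l m : List String) : String.join (l ++ m) = String.join l ++ String.join m := by
  rw [pvJoinEq, List.foldl_append, pvFoldlAppend, ← pvJoinEq]

theorem pvRunTrue (mv : String) (mm : Bool) :
    ∀ (run : List (String × Bool)), (∀ p ∈ run, p.2 = true) → ∀ (res : String),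
      List.foldl (pvF mv mm) (res, false) run = (res ++ String.join (run.map Prod.fst), false) := by
  intro run
  induction run with
  | nil => intro _ res; simp [pvJoinEq, String.append_empty]
  | cons p t ih =>
    intro h res
    have hp : p.2 = true := h p (by simp)
    have hstep : pvF mv mm (res, false) p = (res ++ p.1, false) := by simp [pvF, hp]
    rw [List.foldl_cons, hstep, ih (fun q hq => h q (by simp [hq])) (res ++ p.1),
      List.map_cons, pvJoinCons, String.append_assoc]

theorem pvRunFalseMerge (mv : String) :
    ∀ (run : List (String × Bool)), (∀ p ∈ run, p.2 = false) → ∀ (res : String),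
      List.foldl (pvF mv true) (res, true) run = (res, true) := by
  intro run
  induction run with
  | nil => intro _ res; simp
  | cons p t ih =>
    intro h res
    have hp : p.2 = false := h p (by simp)
    have hstep : pvF mv true (res, true) p = (res, true) := by simp [pvF, hp]
    rw [List.foldl_cons, hstep]
    exact ih (fun q hq => h q (by simp [hq])) res

theorem pvRunFalseNoMerge (mv : String) :
    ∀ (run : List (String × Bool)), (∀ p ∈ run, p.2 = false) → ∀ (res : String),
      List.foldl (pvF mv false) (res, true) run
        = (res ++ String.join (List.replicate run.length mv), true) := by
  intro run
  induction run with
  | nil => intro _ res; simp [pvJoinEq, String.append_empty]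
  | cons p t ih =>
    intro h res
    have hp : p.2 = false := h p (by simp)
    have hstep : pvF mv false (res, true) p = (res ++ mv, true) := by simp [pvF, hp]
    rw [List.foldl_cons, hstep, ih (fun q hq => h q (by simp [hq])) (res ++ mv),
      List.length_cons, List.replicate_succ, pvJoinCons, String.append_assoc]

theorem pvDropWhileHead {α : Type} (q : α → Bool) (l : List α) (a : α)
    (h : (l.dropWhile q).head? = some a) : q a = false := by
  induction l with
  | nil => simp at h
  | cons x xs ih =>
    rw [List.dropWhile_cons] at h
    split at h
    · exact ih h
    · simp_all

theorem pvMain (mv : String) (mm : Bool) :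
    ∀ (N : Nat) (ps : List (String × Bool)), ps.length ≤ N → ∀ (res : String) (prev : Bool),
      (prev = true → ∀ p, ps.head? = some p → p.2 = true) →
      (List.foldl (pvF mv mm) (res, prev) ps).1 = res ++ String.join (pvMaskRuns mv mm ps) := by
  intro N
  induction N with
  | zero =>
    intro ps hlen res prev _
    have : ps = [] := List.length_eq_zero_iff.mp (Nat.le_zero.mp hlen)
    subst this
    simp [pvMaskRuns, pvJoinEq, String.append_empty]
  | succ N ih =>
    intro ps hlen res prev hhead
    cases ps with
    | nil => simp [pvMaskRuns, pvJoinEq, String.append_empty]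
    | cons hd rest =>
      obtain ⟨s, fl⟩ := hd
      cases fl with
      | true =>
        have hsplit : rest.takeWhile (fun p => p.2 == true) ++ rest.dropWhile (fun p => p.2 == true) = rest :=
          List.takeWhile_append_dropWhile
        have hrunflag : ∀ p ∈ rest.takeWhile (fun p => p.2 == true), p.2 = true := by
          intro p hp; simpa using List.mem_takeWhile_imp hp
        have hrestlen : (rest.dropWhile (fun p => p.2 == true)).length ≤ N := by
          have h1 := List.length_dropWhile_le (fun p => p.2 == true) rest
          simp only [List.length_cons] at hlen
          omega
        have hstep : pvF mv mm (res, prev) (s, true) = (res ++ s, false) := by simp [pvF]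
        rw [List.foldl_cons, hstep]
        conv_lhs => rw [← hsplit, List.foldl_append]
        rw [pvRunTrue mv mm _ hrunflag (res ++ s)]
        rw [ih _ hrestlen _ false (by simp)]
        rw [pvMaskRuns]
        simp only [if_pos trivial, pvJoinAppend, pvJoinCons, String.append_assoc]
      | false =>
        have hsplit : rest.takeWhile (fun p => p.2 == false) ++ rest.dropWhile (fun p => p.2 == false) = rest :=
          List.takeWhile_append_dropWhile
        have hrunflag : ∀ p ∈ rest.takeWhile (fun p => p.2 == false), p.2 = false := by
          intro p hp; simpa using List.mem_takeWhile_imp hp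
        have hrestlen : (rest.dropWhile (fun p => p.2 == false)).length ≤ N := by
          have h1 := List.length_dropWhile_le (fun p => p.2 == false) rest
          simp only [List.length_cons] at hlen
          omega
        have hheadtail : (true : Bool) = true → ∀ p, (rest.dropWhile (fun p => p.2 == false)).head? = some p → p.2 = true := by
          intro _ p hp
          have := pvDropWhileHead (fun p => p.2 == false) rest p hp
          simpa using this
        have hprev : prev = false := by
          cases prev
          · rfl
          · exact absurd (hhead rfl (s, false) rfl) (by simp)
        subst hprev
        have hstep : pvF mv mm (res, false) (s, false) = (res ++ mv, true) := by simp [pvF]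
        rw [List.foldl_cons, hstep]
        conv_lhs => rw [← hsplit, List.foldl_append]
        cases mm with
        | true =>
          rw [pvRunFalseMerge mv _ hrunflag (res ++ mv)]
          rw [ih _ hrestlen _ true hheadtail]
          rw [pvMaskRuns]
          simp [pvJoinCons, String.append_assoc]
        | false =>
          rw [pvRunFalseNoMerge mv _ hrunflag (res ++ mv)]
          rw [ih _ hrestlen _ true hheadtail]
          rw [pvMaskRuns]
          simp [pvJoinAppend, List.replicate_succ, pvJoinCons, String.append_assoc]

-- ===== VERDICT (by name: the statement is the Claim_ definition above) =====
theorem mask_input_by_allowed_groups_string_spec : Claim_equal_mask_input_by_allowed_groups_string := by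
  intro segs ga ag mv mm _ _
  unfold Spec_mask_input_by_allowed_groups_string
  unfold mask_input_by_allowed_groups_string mask_input_by_allowed_groups_string_alt
  have hbody : (fun (st : String × Bool) (i : Nat) =>
      if ga.getD i 0 ∈ ag then (st.1 ++ segs.getD i "", false)
      else if mm && st.2 then st
      else (st.1 ++ mv, true))
    = fun (st : String × Bool) (i : Nat) => pvF mv mm st (segs.getD i "", decide (ga.getD i 0 ∈ ag)) := by
    funext st i
    by_cases h : ga.getD i 0 ∈ ag
    · simp [pvF, h]
    · simp [pvF, h]
  have hmain := pvMain mv mm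
    ((List.range segs.length).map (fun i => (segs.getD i "", decide (ga.getD i 0 ∈ ag)))).length
    ((List.range segs.length).map (fun i => (segs.getD i "", decide (ga.getD i 0 ∈ ag))))
    (le_refl _) "" false (by simp)
  rw [List.foldl_map] at hmain
  rw [hbody, hmain]
  exact String.empty_append
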